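-- pv_equiv track=rewrite | github.com/DmitryChitalov/-Python.- | Lesson7.Practice/task_3.py | without_sort
-- ===== SOURCE A (Python) =====
-- def without_sort(arr):
--     n = 0
--     while n < len(arr):
--         more = []
--         less = []
--         for element in range(len(arr)):
--             if arr[n] > arr[element]:
--                 less.append(arr[element])
--             elif arr[n] < arr[element]:
--                 more.append(arr[element])
--         n += 1
--         if len(more) == len(less):
--             break
--     return f'Медиана данного массива - {arr[n - 1]}'
-- ===== SOURCE B (Python) =====
-- def without_sort(arr):
--     # count multiplicities once
--     counts = {}
--     for x in arr:
--         counts[x] = counts.get(x, 0) + 1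
--     n = len(arr)
--     # cumulative counts over the sorted distinct values:
--     # less[v] = number of elements strictly smaller than v
--     less = {}
--     c = 0
--     for v in sorted(counts):
--         less[v] = c
--         c += counts[v]
--     # first element (in original order) with equally many smaller and
--     # greater elements; like A, fall back to the last element if none
--     ans = arr[-1]
--     for x in arr:
--         if 2 * less[x] + counts[x] == n:
--             ans = x
--             break
--     return f'Медиана данного массива - {ans}'
-- ===== Notes on version B (the rewrite author's own statement) =====
-- stated objective: faster
-- what changed: A rescans the whole array for every candidate (quadratic); B builds a multiplicity dict and a cumulative less-than dict from the sorted distinct values once, then a single scan in original order finds the first element with equal smaller/greater counts.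
-- outside the precondition, e.g. on without_sort([]): A raises IndexError, B raises IndexError
import Mathlib
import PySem

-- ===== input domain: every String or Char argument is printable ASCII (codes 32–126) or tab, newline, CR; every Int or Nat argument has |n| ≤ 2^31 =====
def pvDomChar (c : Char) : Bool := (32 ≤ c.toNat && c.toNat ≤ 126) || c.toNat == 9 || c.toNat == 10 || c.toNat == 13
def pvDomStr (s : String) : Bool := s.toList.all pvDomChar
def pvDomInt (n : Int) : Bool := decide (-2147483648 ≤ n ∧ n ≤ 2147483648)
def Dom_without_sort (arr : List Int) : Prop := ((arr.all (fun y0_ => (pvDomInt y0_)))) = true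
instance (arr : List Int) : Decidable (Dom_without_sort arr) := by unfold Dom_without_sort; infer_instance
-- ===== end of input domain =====

-- B replaces A's quadratic rescans by one multiplicity dict, one cumulative dict over the
-- sorted distinct values, and a single scan in original order (asymptotically faster).

-- ===== PORT A =====
-- A's while-loop: scan index n; at each n rescan the whole array into `less`/`more`; stop
-- (n already incremented) when their lengths agree; returns the final n.
def without_sort_loop (arr : List Int) (n : Nat) : Nat :=
  if h : n < arr.length then
    let cur := PySem.List.pyGetD arr (n : Int) 0
    let ml := (PySem.List.pyRange 0 (arr.length : Int) 1).foldl
      (fun (p : List Int × List Int) e =>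
        let ae := PySem.List.pyGetD arr e 0
        if cur > ae then (p.1, p.2 ++ [ae])
        else if cur < ae then (p.1 ++ [ae], p.2)
        else p) ([], [])
    if ml.1.length = ml.2.length then n + 1
    else without_sort_loop arr (n + 1)
  else n
termination_by arr.length - n

def without_sort (arr : List Int) : String :=
  match PySem.List.pyGet? arr (((without_sort_loop arr 0 : Nat) : Int) - 1) with
  | some v => "Медиана данного массива - " ++ PySem.Int.toStr v
  | none => ""   -- this branch is Python's IndexError (arr = []), excluded by Pre_

-- ===== PORT B =====
def without_sort_alt (arr : List Int) : String :=
  -- counts[x] = multiplicity of x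
  let counts := arr.foldl (fun (d : PySem.Dict Int Int) x => d.insert x (d.getD x 0 + 1))
                  PySem.Dict.empty
  let n : Int := arr.length
  -- less[v] = number of elements strictly smaller than v (cumulative over sorted keys)
  let lc := (PySem.List.sorted counts.keys (fun v => v) false).foldl
      (fun (p : PySem.Dict Int Int × Int) v => (p.1.insert v p.2, p.2 + counts.getD v 0))
      (PySem.Dict.empty, 0)
  let less := lc.1
  match PySem.List.pyGet? arr (-1) with   -- none = Python's IndexError on [], excluded by Pre_
  | some last =>
    let ans := match arr.find? (fun x => 2 * less.getD x 0 + counts.getD x 0 == n) with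
      | some x => x
      | none => last
    "Медиана данного массива - " ++ PySem.Int.toStr ans
  | none => ""

-- ===== PRECONDITION & SPEC =====
-- Pre_ excludes only the empty list, on which A raises IndexError (arr[n-1] with n = 0).
def Pre_without_sort (arr : List Int) : Prop := arr ≠ []
instance (arr : List Int) : Decidable (Pre_without_sort arr) := by
  unfold Pre_without_sort; infer_instance
def pvWitness_without_sort : List Int := [3, 1, 2]

def Spec_without_sort (arr : List Int) (out : String) : Prop := out = without_sort_alt arr
instance (arr : List Int) (out : String) : Decidable (Spec_without_sort arr out) := by
  unfold Spec_without_sort; infer_instance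

-- ===== CLAIM (what is proved, stated in full; the proofs are below) =====
def Claim_equal_without_sort : Prop :=
  ∀ (arr : List Int), Dom_without_sort arr → Pre_without_sort arr →
    Spec_without_sort arr (without_sort arr)

-- ===== LEMMAS AND PROOFS =====

-- the median test: as many strictly greater as strictly smaller elements
def cntLt (arr : List Int) (x : Int) : Nat := arr.countP (fun y => decide (y < x))
def cntGt (arr : List Int) (x : Int) : Nat := arr.countP (fun y => decide (x < y))
def medP (arr : List Int) (x : Int) : Bool := cntGt arr x == cntLt arr x

theorem innerFold (arr : List Int) (cur : Int) :
    ∀ (m l : List Int),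
      arr.foldl (fun (p : List Int × List Int) ae =>
          if cur > ae then (p.1, p.2 ++ [ae])
          else if cur < ae then (p.1 ++ [ae], p.2)
          else p) (m, l)
        = (m ++ arr.filter (fun y => decide (cur < y)),
           l ++ arr.filter (fun y => decide (y < cur))) := by
  induction arr with
  | nil => simp
  | cons a t ih =>
    intro m l
    simp only [List.foldl_cons, List.filter_cons]
    by_cases h1 : cur > a
    · have h2 : ¬ cur < a := by omega
      simp [h1, h2, ih]
    · by_cases h2 : cur < a
      · simp [h1, h2, ih]
      · simp [h1, h2, ih]

theorem loopA (arr : List Int) :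
    ∀ (k n : Nat), arr.length = n + k →
      (match (arr.drop n).find? (medP arr) with
       | some x => PySem.List.pyGet? arr ((without_sort_loop arr n : Int) - 1) = some x
       | none => without_sort_loop arr n = arr.length) := by
  intro k
  induction k with
  | zero =>
    intro n hn
    have h : ¬ n < arr.length := by omega
    have hd : arr.drop n = [] := by
      apply List.drop_eq_nil_of_le; omega
    rw [hd]
    simp [without_sort_loop, h]
    omega
  | succ k ih =>
    intro n hn
    have h : n < arr.length := by omega
    have hd : arr.drop n = arr[n] :: arr.drop (n + 1) :=
      (List.getElem_cons_drop h).symm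
    have hcur : PySem.List.pyGetD arr (n : Int) 0 = arr[n] := by
      rw [PySem.List.pyGetD_natCast]; exact List.getD_eq_getElem arr 0 h
    rw [without_sort_loop]
    simp only [h, dif_pos]
    rw [PySem.List.foldl_pyRange_zero_pyGetD' arr 0
      (fun (p : List Int × List Int) ae =>
        if PySem.List.pyGetD arr (n : Int) 0 > ae then (p.1, p.2 ++ [ae])
        else if PySem.List.pyGetD arr (n : Int) 0 < ae then (p.1 ++ [ae], p.2)
        else p) ([], [])]
    rw [innerFold arr (PySem.List.pyGetD arr (n : Int) 0) [] []]
    simp only [List.nil_append, hcur]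
    rw [← List.getElem_cons_drop h]
    have hGt : (arr.filter (fun y => decide (arr[n] < y))).length = cntGt arr arr[n] :=
      (List.countP_eq_length_filter).symm
    have hLt : (arr.filter (fun y => decide (y < arr[n]))).length = cntLt arr arr[n] :=
      (List.countP_eq_length_filter).symm
    rw [hGt, hLt]
    by_cases hm : medP arr arr[n] = true
    · have hm' : cntGt arr arr[n] = cntLt arr arr[n] := by
        unfold medP at hm; exact beq_iff_eq.mp hm
      rw [List.find?_cons_of_pos hm, if_pos hm']
      have hc : (((n + 1 : Nat)) : Int) - 1 = (n : Int) := by push_cast; ring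
      simp only [hc, PySem.List.pyGet?_natCast]
      exact List.getElem?_eq_getElem h
    · have hm' : ¬ cntGt arr arr[n] = cntLt arr arr[n] := by
        intro hc; exact hm (by unfold medP; exact beq_iff_eq.mpr hc)
      rw [List.find?_cons_of_neg hm, if_neg hm']
      exact ih (n + 1) (by omega)

-- folding further keys that are all ≠ x does not change the entry at x
theorem foldNoTouch (f : Int → Int) (x : Int) :
    ∀ (t : List Int) (d : PySem.Dict Int Int) (c : Int), (∀ k ∈ t, k ≠ x) →
      ((t.foldl (fun (p : PySem.Dict Int Int × Int) v => (p.1.insert v p.2, p.2 + f v))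
          (d, c)).1).getD x 0 = d.getD x 0 := by
  intro t
  induction t with
  | nil => intro d c _; rfl
  | cons a t ih =>
    intro d c hk
    simp only [List.foldl_cons]
    rw [ih (d.insert a c) (c + f a) (fun k hk' => hk k (List.mem_cons_of_mem a hk'))]
    rw [PySem.Dict.getD_insert]
    rw [if_neg (fun hc => hk a List.mem_cons_self hc.symm)]

-- the cumulative fold stores, at key x, c plus the f-sum of the keys before x
theorem foldCum (f : Int → Int) (x : Int) :
    ∀ (ks : List Int) (d : PySem.Dict Int Int) (c : Int),
      ks.Pairwise (· < ·) → x ∈ ks →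
      ((ks.foldl (fun (p : PySem.Dict Int Int × Int) v => (p.1.insert v p.2, p.2 + f v))
          (d, c)).1).getD x 0
        = c + ((ks.takeWhile (fun v => decide (v < x))).map f).sum := by
  intro ks
  induction ks with
  | nil => intro d c _ hx; cases hx
  | cons a t ih =>
    intro d c hp hx
    simp only [List.foldl_cons]
    by_cases hxa : x = a
    · subst hxa
      have hna : ¬ (x < x) := lt_irrefl x
      rw [List.takeWhile_cons_of_neg (by simp)]
      simp only [List.map_nil, List.sum_nil, add_zero]
      rw [foldNoTouch f x t (d.insert x c) (c + f x)
        (fun k hk => (ne_of_gt (List.rel_of_pairwise_cons hp hk)))]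
      exact PySem.Dict.getD_insert_self d x c 0
    · have hxt : x ∈ t := by
        rcases List.mem_cons.mp hx with h | h
        · exact absurd h hxa
        · exact h
      have hax : a < x := List.rel_of_pairwise_cons hp hxt
      rw [List.takeWhile_cons_of_pos (by simpa using hax)]
      rw [ih (d.insert a c) (c + f a) (List.Pairwise.of_cons hp) hxt]
      simp only [List.map_cons, List.sum_cons]
      ring

-- on a strictly increasing list, takeWhile (· < x) is filter (· < x)
theorem takeWhile_eq_filter_of_sorted (x : Int) :
    ∀ (ks : List Int), ks.Pairwise (· < ·) →
      ks.takeWhile (fun v => decide (v < x)) = ks.filter (fun v => decide (v < x)) := by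
  intro ks
  induction ks with
  | nil => intro _; rfl
  | cons a t ih =>
    intro hp
    by_cases ha : a < x
    · rw [List.takeWhile_cons_of_pos (by simpa using ha),
        List.filter_cons_of_pos (by simpa using ha), ih (List.Pairwise.of_cons hp)]
    · rw [List.takeWhile_cons_of_neg (by simpa using ha),
        List.filter_cons_of_neg (by simpa using ha)]
      rw [List.filter_eq_nil_iff.mpr]
      intro v hv
      have : a < v := List.rel_of_pairwise_cons hp hv
      simp; omega

-- sum of multiplicities over any nodup enumeration of the small values = countP
theorem sum_count_eq_countP (arr : List Int) (x : Int) (L : List Int)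
    (hnd : L.Nodup) (hmem : ∀ a, a ∈ L ↔ a ∈ arr) :
    ((L.filter (fun v => decide (v < x))).map (fun v => (arr.count v : Int))).sum
      = (cntLt arr x : Int) := by
  have hperm : List.Perm (L.filter (fun v => decide (v < x)))
      (arr.dedup.filter (fun v => decide (v < x))) := by
    rw [List.perm_ext_iff_of_nodup (hnd.filter _) (arr.nodup_dedup.filter _)]
    intro a
    simp [List.mem_filter, hmem a, List.mem_dedup]
  rw [(hperm.map (fun v => (arr.count v : Int))).sum_eq]
  unfold cntLt
  rw [← List.sum_map_count_dedup_filter_eq_countP (fun v => decide (v < x)) arr]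
  push_cast
  rw [List.map_map]
  rfl

-- each element is smaller, equal or greater: the three counts partition the length
theorem triCount (arr : List Int) (x : Int) :
    cntLt arr x + arr.count x + cntGt arr x = arr.length := by
  unfold cntLt cntGt
  induction arr with
  | nil => rfl
  | cons a t ih =>
    simp only [List.countP_cons, List.count_cons, List.length_cons]
    rcases lt_trichotomy a x with h | h | h
    · have h2 : ¬ x < a := by omega
      have h3 : ¬ a == x := by simp; omega
      simp only [h, h2, h3, decide_true, decide_false]
      simp; omega
    · subst h
      have h2 : ¬ a < a := lt_irrefl a
      simp only [h2, decide_false, beq_self_eq_true]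
      simp; omega
    · have h2 : ¬ a < x := by omega
      have h3 : ¬ a == x := by simp; omega
      simp only [h, h2, h3, decide_true, decide_false]
      simp; omega

theorem find?_congr_mem {α : Type} (p q : α → Bool) :
    ∀ (l : List α), (∀ x ∈ l, p x = q x) → l.find? p = l.find? q := by
  intro l
  induction l with
  | nil => intro _; rfl
  | cons a t ih =>
    intro h
    rw [List.find?_cons, List.find?_cons, h a List.mem_cons_self,
      ih (fun x hx => h x (List.mem_cons_of_mem a hx))]

-- B's scan predicate agrees with medP on every element of arr
theorem predB_eq_medP (arr : List Int) (x : Int) (hx : x ∈ arr) :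
    (2 * (((PySem.List.sorted (PySem.Dict.counter arr).keys (fun v => v) false).foldl
        (fun (p : PySem.Dict Int Int × Int) v =>
          (p.1.insert v p.2, p.2 + (PySem.Dict.counter arr).getD v 0))
        (PySem.Dict.empty, 0)).1).getD x 0
      + (PySem.Dict.counter arr).getD x 0 == (arr.length : Int))
    = medP arr x := by
  set ks := PySem.List.sorted (PySem.Dict.counter arr).keys (fun v => v) false with hks
  have hmemks : ∀ a, a ∈ ks ↔ a ∈ arr := by
    intro a
    rw [hks, PySem.List.mem_sorted, PySem.Dict.keys_counter, PySem.Set.mem_ofList]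
  have hnd : ks.Nodup :=
    (PySem.List.sorted_perm (PySem.Dict.counter arr).keys (fun v => v) false).nodup_iff.mpr
      (PySem.Dict.nodup_keys_counter arr)
  have hle : ks.Pairwise (fun a b => (fun v => v) a ≤ (fun v => v) b) :=
    PySem.List.sorted_pairwise (PySem.Dict.counter arr).keys (fun v => v)
  have hlt : ks.Pairwise (· < ·) := by
    have := List.Pairwise.and hle hnd
    exact this.imp (fun h => lt_of_le_of_ne h.1 h.2)
  have hcongr : ks.foldl
      (fun (p : PySem.Dict Int Int × Int) v =>
        (p.1.insert v p.2, p.2 + (PySem.Dict.counter arr).getD v 0))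
      (PySem.Dict.empty, 0)
    = ks.foldl
      (fun (p : PySem.Dict Int Int × Int) v =>
        (p.1.insert v p.2, p.2 + (arr.count v : Int)))
      (PySem.Dict.empty, 0) := by
    apply PySem.List.foldl_congr_mem
    intro acc a _
    rw [PySem.Dict.getD_counter]
  rw [hcongr]
  rw [foldCum (fun v => (arr.count v : Int)) x ks PySem.Dict.empty 0 hlt
    ((hmemks x).mpr hx)]
  rw [takeWhile_eq_filter_of_sorted x ks hlt]
  rw [sum_count_eq_countP arr x ks hnd hmemks]
  rw [PySem.Dict.getD_counter]
  have htri := triCount arr x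
  unfold medP
  rw [Bool.eq_iff_iff]
  simp only [beq_iff_eq, zero_add]
  constructor
  · intro hq; omega
  · intro hq; omega

-- B computes: first element with equal counts, else the last element
theorem altChar (arr : List Int) (h : arr ≠ []) :
    without_sort_alt arr =
      "Медиана данного массива - " ++ PySem.Int.toStr
        (match arr.find? (medP arr) with
         | some x => x
         | none => arr.getLast h) := by
  unfold without_sort_alt
  simp only [PySem.Dict.foldl_insert_getD_add_one_eq_counter]
  rw [PySem.List.pyGet?_neg_one, List.getLast?_eq_getLast_of_ne_nil h]
  simp only []
  rw [find?_congr_mem _ _ arr (fun x hx => predB_eq_medP arr x hx)]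

-- ===== VERDICT (by name: the statement is the Claim_ definition above) =====
theorem without_sort_spec : Claim_equal_without_sort := by
  unfold Claim_equal_without_sort
  intro arr _ hpre
  unfold Spec_without_sort
  unfold Pre_without_sort at hpre
  rw [altChar arr hpre]
  unfold without_sort
  have hA := loopA arr arr.length 0 (by omega)
  simp only [List.drop_zero] at hA
  cases hfind : arr.find? (medP arr) with
  | some x =>
    rw [hfind] at hA
    simp only [hA]
  | none =>
    rw [hfind] at hA
    rw [hA]
    have hlen : 1 ≤ arr.length := by
      cases arr with
      | nil => exact absurd rfl hpre
      | cons a t => simp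
    have hcast : ((arr.length : Int) - 1) = ((arr.length - 1 : Nat) : Int) := by
      push_cast [hlen]; ring
    rw [hcast, PySem.List.pyGet?_natCast]
    rw [List.getElem?_eq_getElem (by omega)]
    simp [List.getLast_eq_getElem]
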